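-- pv_equiv track=rewrite | github.com/mcpq/mcpq-python | mcpq/nbt.py | parse_snbt_string_start
-- ===== SOURCE A (Python) =====
-- import string
--
-- NONQUOTABLE_STR = string.digits + string.ascii_letters + "_-.+"
--
-- def parse_snbt_string_start(value: str) -> tuple[str, int]:
--     "Parse the start of value for a valid string and return that substring and index of end of string"
--     if not value:
--         return "", 0
--
--     # non quoted string
--     if value[0] not in ["'", '"']:
--         for i, l in enumerate(value):
--             if l not in NONQUOTABLE_STR:
--                 break
--         return value[:i], i
--
--     # quoted string
--     escape = False
--     endstr = value[0]  # either ' or "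
--     for i in range(1, len(value)):
--         l = value[i]
--         if escape:
--             escape = False
--             if l == "\\":
--                 pass
--             elif endstr != l:
--                 raise ValueError(f"`{value}` contains invalid escape character `{l}`")
--         elif l == "\\":
--             escape = True
--         elif l == endstr:
--             return value[1:i].replace("\\" + endstr, endstr).replace("\\\\", "\\"), i + 1
--     raise ValueError(f"`{value}` string not correctly closed")
-- ===== SOURCE B (Python) =====
-- import string
--
-- NONQUOTABLE_STR = string.digits + string.ascii_letters + "_-.+"
--
--
-- def parse_snbt_string_start(value: str) -> tuple[str, int]:
--     "Parse the start of value for a valid string and return that substring and index of end of string"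
--     if not value:
--         return "", 0
--
--     # non quoted string (same loop as the original, including its final-index behaviour)
--     if value[0] not in ["'", '"']:
--         for i, l in enumerate(value):
--             if l not in NONQUOTABLE_STR:
--                 break
--         return value[:i], i
--
--     # quoted string: single scan that decodes escapes into a buffer as it goes
--     q = value[0]
--     buf = []
--     escape = False
--     for i in range(1, len(value)):
--         l = value[i]
--         if escape:
--             escape = False
--             if l == "\\" or l == q:
--                 buf.append(l)
--             else:
--                 raise ValueError(f"`{value}` contains invalid escape character `{l}`")
--         elif l == "\\":
--             escape = True
--         elif l == q:
--             return "".join(buf), i + 1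
--         else:
--             buf.append(l)
--     raise ValueError(f"`{value}` string not correctly closed")
-- ===== Notes on version B (the rewrite author's own statement) =====
-- stated objective: simpler
-- what changed: The quoted branch's find-closing-index-then-two-.replace() post-processing is replaced by a single scan that decodes escapes into a buffer as it goes and returns at the closing quote; the empty and bare-string branches are unchanged.
import Mathlib
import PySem

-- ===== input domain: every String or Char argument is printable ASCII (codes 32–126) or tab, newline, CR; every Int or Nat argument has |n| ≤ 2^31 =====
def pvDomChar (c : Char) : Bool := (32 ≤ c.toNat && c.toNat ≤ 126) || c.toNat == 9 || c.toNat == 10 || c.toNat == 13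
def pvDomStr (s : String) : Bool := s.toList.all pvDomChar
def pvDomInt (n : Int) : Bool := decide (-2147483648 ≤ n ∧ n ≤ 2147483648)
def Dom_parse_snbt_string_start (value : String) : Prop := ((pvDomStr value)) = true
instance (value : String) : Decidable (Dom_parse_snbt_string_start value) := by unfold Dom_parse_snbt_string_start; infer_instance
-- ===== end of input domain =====

-- B replaces A's find-the-closing-quote-then-two-.replace() scheme in the quoted branch by a single
-- scan that decodes escapes into a buffer as it goes (objective: simpler, one pass instead of three).

-- ===== PORT A =====
def pvNONQUOTABLE_STR : String := "0123456789abcdefghijklmnopqrstuvwxyzABCDEFGHIJKLMNOPQRSTUVWXYZ_-.+"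

-- 'for i, l in enumerate(value): if l not in NONQUOTABLE_STR: break' — returns Python's final i
-- ('l not in NONQUOTABLE_STR' for a single char l is exactly negated char membership)
def pvBareScan : List Char → Nat → Nat
  | [], i => i
  | c :: rest, i =>
    if ¬ (pvNONQUOTABLE_STR.toList.contains c) then i
    else match rest with
      | [] => i
      | _ :: _ => pvBareScan rest (i + 1)

-- A's quoted loop: 'for i in range(1, len(value))' over the tail, escape flag; none = ValueError
def pvAQuoted : Char → List Char → Nat → Bool → Option Nat
  | _, [], _, _ => none
  | endstr, l :: rest, i, escape =>
    if escape then
      if l = '\\' then pvAQuoted endstr rest (i + 1) false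
      else if endstr ≠ l then none  -- raise ValueError (invalid escape character)
      else pvAQuoted endstr rest (i + 1) false
    else if l = '\\' then pvAQuoted endstr rest (i + 1) true
    else if l = endstr then some i
    else pvAQuoted endstr rest (i + 1) false

def pvParseACore : List Char → String × Int
  | [] => ("", 0)
  | c0 :: rest =>
    if c0 ≠ '\'' ∧ c0 ≠ '"' then
      let i := pvBareScan (c0 :: rest) 0
      (String.ofList (PySem.List.slice (c0 :: rest) none (some (i : Int))), (i : Int))
    else
      match pvAQuoted c0 rest 1 false with
      | some i =>
        (PySem.Str.replace
          (PySem.Str.replace (String.ofList (PySem.List.slice (c0 :: rest) (some 1) (some (i : Int))))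
            (String.ofList ['\\', c0]) (String.ofList [c0]))
          (String.ofList ['\\', '\\']) (String.ofList ['\\']), ((i : Int) + 1))
      | none => ("", 0)  -- raise ValueError (string not correctly closed); excluded by Pre_

def parse_snbt_string_start (value : String) : String × Int :=
  pvParseACore value.toList

-- ===== PORT B =====
-- B's quoted loop: same index walk, but decodes into a buffer; none = ValueError
def pvBQuoted : Char → List Char → Nat → Bool → List Char → Option (List Char × Nat)
  | _, [], _, _, _ => none
  | q, l :: rest, i, escape, buf =>
    if escape then
      if l = '\\' ∨ l = q then pvBQuoted q rest (i + 1) false (buf ++ [l])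
      else none  -- raise ValueError (invalid escape character)
    else if l = '\\' then pvBQuoted q rest (i + 1) true buf
    else if l = q then some (buf, i + 1)
    else pvBQuoted q rest (i + 1) false (buf ++ [l])

def pvParseBCore : List Char → String × Int
  | [] => ("", 0)
  | c0 :: rest =>
    if c0 ≠ '\'' ∧ c0 ≠ '"' then
      let i := pvBareScan (c0 :: rest) 0
      (String.ofList (PySem.List.slice (c0 :: rest) none (some (i : Int))), (i : Int))
    else
      match pvBQuoted c0 rest 1 false [] with
      | some (buf, j) => (String.ofList buf, (j : Int))
      | none => ("", 0)  -- raise ValueError (string not correctly closed); excluded by Pre_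

def parse_snbt_string_start_alt (value : String) : String × Int :=
  pvParseBCore value.toList

-- ===== PRECONDITION & SPEC =====
-- Well-formedness of the tail of a quoted literal: a closing quote is reached, every backslash
-- escapes either a backslash or the quote char (exactly the inputs where Python A raises ValueError
-- are excluded; A raises nowhere else).
def pvQuotedOk : Char → List Char → Bool
  | _, [] => false
  | q, c :: rest =>
    if c = '\\' then
      match rest with
      | [] => false
      | d :: ds => (d = '\\' || d = q) && pvQuotedOk q ds
    else if c = q then true
    else pvQuotedOk q rest

def Pre_parse_snbt_string_start (value : String) : Prop :=
  (match value.toList with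
   | [] => true
   | c0 :: rest => (!(c0 == '\'' || c0 == '"')) || pvQuotedOk c0 rest) = true

instance (value : String) : Decidable (Pre_parse_snbt_string_start value) := by
  unfold Pre_parse_snbt_string_start; infer_instance

def pvWitness_parse_snbt_string_start : String := "\"a\\\\b\""

def Spec_parse_snbt_string_start (value : String) (out : String × Int) : Prop := out = parse_snbt_string_start_alt value
instance (value : String) (out : String × Int) : Decidable (Spec_parse_snbt_string_start value out) := by unfold Spec_parse_snbt_string_start; infer_instance

-- ===== CLAIM (what is proved, stated in full; the proofs are below) =====
def Claim_equal_parse_snbt_string_start : Prop := ∀ (value : String), Dom_parse_snbt_string_start value → Pre_parse_snbt_string_start value → Spec_parse_snbt_string_start value (parse_snbt_string_start value)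

-- ===== LEMMAS AND PROOFS =====

-- the valid interiors of a quoted literal
inductive PvValid (q : Char) : List Char → Prop
  | nil : PvValid q []
  | plain (c : Char) (t : List Char) : c ≠ q → c ≠ '\\' → PvValid q t → PvValid q (c :: t)
  | esc (d : Char) (t : List Char) : d = '\\' ∨ d = q → PvValid q t → PvValid q ('\\' :: d :: t)

-- decode: drop one backslash in front of every escaped character
def pvDecode : List Char → List Char
  | [] => []
  | '\\' :: d :: t => d :: pvDecode t
  | c :: t => c :: pvDecode t

-- the result of the first .replace ("\\" + q -> q)
def pvD1 (q : Char) : List Char → List Char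
  | [] => []
  | '\\' :: d :: t => if d = q then q :: pvD1 q t else '\\' :: d :: pvD1 q t
  | c :: t => c :: pvD1 q t

-- shape of pvD1's output: backslashes only in "\\\\" pairs
inductive PvValid2 : List Char → Prop
  | nil : PvValid2 []
  | plain (c : Char) (t : List Char) : c ≠ '\\' → PvValid2 t → PvValid2 (c :: t)
  | pair (t : List Char) : PvValid2 t → PvValid2 ('\\' :: '\\' :: t)

theorem pvQuotedOk_split (q : Char) (l : List Char) (h : pvQuotedOk q l = true) :
    ∃ inner rest, l = inner ++ q :: rest ∧ PvValid q inner := by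
  induction q, l using pvQuotedOk.induct with
  | case1 => simp [pvQuotedOk] at h
  | case2 q => simp [pvQuotedOk] at h
  | case3 q d ds ih =>
      rw [pvQuotedOk] at h
      obtain ⟨hd, hok⟩ := Bool.and_eq_true_iff.mp h
      obtain ⟨inner, rest', heq, hv⟩ := ih hok
      exact ⟨'\\' :: d :: inner, rest', by simp [heq],
        PvValid.esc d inner (by simpa using hd) hv⟩
  | case4 c rest hc =>
      exact ⟨[], rest, rfl, PvValid.nil⟩
  | case5 q c rest hc hcq ih =>
      rw [pvQuotedOk.eq_def] at h
      simp only [if_neg hc, if_neg hcq] at h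
      obtain ⟨inner, rest', heq, hv⟩ := ih h
      exact ⟨c :: inner, rest', by simp [heq], PvValid.plain c inner hcq hc hv⟩

theorem pvValid_head_ne (q : Char) (hq : q ≠ '\\') (l : List Char) (h : PvValid q l)
    (c : Char) (hc : l.head? = some c) : c ≠ q := by
  cases h with
  | nil => simp at hc
  | plain c' t h1 h2 _ => simp at hc; subst hc; exact h1
  | esc d t hd _ => simp at hc; subst hc; exact fun he => hq he.symm

theorem pvDecode_cons_ne (c : Char) (t : List Char) (hc : c ≠ '\\') :
    pvDecode (c :: t) = c :: pvDecode t := by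
  cases t <;> simp [pvDecode, hc]

theorem pvBQuoted_spec (q : Char) (hq : q ≠ '\\') (inner : List Char) (h : PvValid q inner) :
    ∀ (rest : List Char) (i : Nat) (buf : List Char),
      pvBQuoted q (inner ++ q :: rest) i false buf = some (buf ++ pvDecode inner, i + inner.length + 1) := by
  induction h with
  | nil =>
      intro rest i buf
      simp [pvBQuoted, pvDecode, hq]
  | plain c t h1 h2 _ ih =>
      intro rest i buf
      rw [List.cons_append, pvBQuoted]
      simp only [if_neg h2, if_neg h1, ih, pvDecode_cons_ne c t h2]
      simp
      omega
  | esc d t hd _ ih =>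
      intro rest i buf
      rw [List.cons_append, List.cons_append, pvBQuoted]
      simp only [Bool.false_eq_true, if_false, if_true]
      rw [pvBQuoted]
      simp only [if_true, if_pos hd, ih]
      congr 2
      · simp [pvDecode]
      · simp; omega

theorem pvAQuoted_spec (q : Char) (hq : q ≠ '\\') (inner : List Char) (h : PvValid q inner) :
    ∀ (rest : List Char) (i : Nat),
      pvAQuoted q (inner ++ q :: rest) i false = some (i + inner.length) := by
  induction h with
  | nil => intro rest i; simp [pvAQuoted, hq]
  | plain c t h1 h2 _ ih =>
      intro rest i
      rw [List.cons_append, pvAQuoted]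
      simp only [if_neg h2, if_neg h1, ih]
      simp; omega
  | esc d t hd _ ih =>
      intro rest i
      rw [List.cons_append, List.cons_append, pvAQuoted]
      simp only [Bool.false_eq_true, if_false, if_true]
      rw [pvAQuoted.eq_def]
      simp only [if_true]
      rcases hd with h|h
      · rw [if_pos h, ih]
        congr 1
        simp only [List.length_cons]
        omega
      · have hd' : d ≠ '\\' := h ▸ hq
        rw [if_neg hd', if_neg (fun hn => hn h.symm), ih]
        congr 1
        simp only [List.length_cons]
        omega

theorem pvGo_nil (old new : List Char) (fuel : Nat) (acc : List Char) :
    PySem.Chars.replace.go old new fuel [] acc = acc.reverse := by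
  cases fuel <;> simp [PySem.Chars.replace.go]

theorem pvGo_succ_cons (old new : List Char) (fuel : Nat) (c : Char) (t acc : List Char) :
    PySem.Chars.replace.go old new (fuel + 1) (c :: t) acc =
      if old.isPrefixOf (c :: t) then
        PySem.Chars.replace.go old new fuel (List.drop old.length (c :: t)) (new.reverse ++ acc)
      else PySem.Chars.replace.go old new fuel t (c :: acc) := by
  rfl

theorem pvGo1_spec (q : Char) (hq : q ≠ '\\') (inner : List Char) (h : PvValid q inner) :
    ∀ (fuel : Nat) (acc : List Char), inner.length ≤ fuel →
      PySem.Chars.replace.go ['\\', q] [q] fuel inner acc = acc.reverse ++ pvD1 q inner := by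
  induction h with
  | nil => intro fuel acc _; simp [pvGo_nil, pvD1]
  | plain c t h1 h2 _ ih =>
      intro fuel acc hf
      obtain ⟨f, rfl⟩ : ∃ f, fuel = f + 1 := ⟨fuel - 1, by simp at hf; omega⟩
      rw [pvGo_succ_cons]
      have hpre : (['\\', q].isPrefixOf (c :: t)) = false := by
        simp [List.isPrefixOf]; intro he; exact absurd he.symm h2
      rw [hpre]
      simp only [Bool.false_eq_true, if_false]
      rw [ih f (c :: acc) (by simp at hf; omega)]
      cases t <;> simp [pvD1, h2]
  | esc d t hd _ ih =>
      intro fuel acc hf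
      rcases hd with hdq | hdq
      · -- d = '\\' : two plain steps
        subst hdq
        obtain ⟨f, rfl⟩ : ∃ f, fuel = f + 1 + 1 := ⟨fuel - 2, by simp at hf; omega⟩
        rw [pvGo_succ_cons]
        have hpre : (['\\', q].isPrefixOf ('\\' :: '\\' :: t)) = false := by
          simp [List.isPrefixOf]; exact hq
        rw [hpre]
        simp only [Bool.false_eq_true, if_false]
        rw [pvGo_succ_cons]
        have hpre2 : (['\\', q].isPrefixOf ('\\' :: t)) = false := by
          cases t with
          | nil => simp [List.isPrefixOf]
          | cons x xs =>
              simp [List.isPrefixOf]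
              intro hx
              exact absurd hx.symm (pvValid_head_ne q hq _ (by assumption) x rfl)
        rw [hpre2]
        simp only [Bool.false_eq_true, if_false]
        rw [ih f ('\\' :: '\\' :: acc) (by simp at hf; omega)]
        simp [pvD1]
        exact fun he => hq he.symm
      · -- d = q
        subst hdq
        obtain ⟨f, rfl⟩ : ∃ f, fuel = f + 1 := ⟨fuel - 1, by simp at hf; omega⟩
        rw [pvGo_succ_cons]
        have hpre : (['\\', d].isPrefixOf ('\\' :: d :: t)) = true := by
          simp [List.isPrefixOf]
        rw [hpre]
        simp only [if_true]
        rw [show List.drop (['\\', d].length) ('\\' :: d :: t) = t from rfl]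
        rw [ih f _ (by simp at hf; omega)]
        simp [pvD1]

theorem pvD1_valid2 (q : Char) (hq : q ≠ '\\') (inner : List Char) (h : PvValid q inner) :
    PvValid2 (pvD1 q inner) := by
  induction h with
  | nil => exact PvValid2.nil
  | plain c t h1 h2 _ ih =>
      have : pvD1 q (c :: t) = c :: pvD1 q t := by cases t <;> simp [pvD1, h2]
      rw [this]; exact PvValid2.plain c _ h2 ih
  | esc d t hd _ ih =>
      rcases hd with h|h
      · rw [h]
        have : pvD1 q ('\\' :: '\\' :: t) = '\\' :: '\\' :: pvD1 q t := by
          simp [pvD1]; exact fun he => hq he.symm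
        rw [this]; exact PvValid2.pair _ ih
      · rw [h]
        have : pvD1 q ('\\' :: q :: t) = q :: pvD1 q t := by simp [pvD1]
        rw [this]; exact PvValid2.plain q _ hq ih

theorem pvDecode_D1 (q : Char) (hq : q ≠ '\\') (inner : List Char) (h : PvValid q inner) :
    pvDecode (pvD1 q inner) = pvDecode inner := by
  induction h with
  | nil => rfl
  | plain c t h1 h2 _ ih =>
      have hD : pvD1 q (c :: t) = c :: pvD1 q t := by cases t <;> simp [pvD1, h2]
      rw [hD, pvDecode_cons_ne c _ h2, pvDecode_cons_ne c t h2, ih]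
  | esc d t hd _ ih =>
      rcases hd with h|h
      · rw [h]
        have hD : pvD1 q ('\\' :: '\\' :: t) = '\\' :: '\\' :: pvD1 q t := by
          simp [pvD1]; exact fun he => hq he.symm
        rw [hD]
        show '\\' :: pvDecode (pvD1 q t) = '\\' :: pvDecode t
        rw [ih]
      · rw [h]
        have hD : pvD1 q ('\\' :: q :: t) = q :: pvD1 q t := by simp [pvD1]
        rw [hD, pvDecode_cons_ne q _ hq]
        show q :: pvDecode (pvD1 q t) = q :: pvDecode t
        rw [ih]

theorem pvGo2_spec (l : List Char) (h : PvValid2 l) :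
    ∀ (fuel : Nat) (acc : List Char), l.length ≤ fuel →
      PySem.Chars.replace.go ['\\', '\\'] ['\\'] fuel l acc = acc.reverse ++ pvDecode l := by
  induction h with
  | nil => intro fuel acc _; simp [pvGo_nil, pvDecode]
  | plain c t hc _ ih =>
      intro fuel acc hf
      obtain ⟨f, rfl⟩ : ∃ f, fuel = f + 1 := ⟨fuel - 1, by simp at hf; omega⟩
      rw [pvGo_succ_cons]
      have hpre : (['\\', '\\'].isPrefixOf (c :: t)) = false := by
        simp [List.isPrefixOf]; intro he; exact absurd he.symm hc
      rw [hpre]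
      simp only [Bool.false_eq_true, if_false]
      rw [ih f (c :: acc) (by simp at hf; omega), pvDecode_cons_ne c t hc]
      simp
  | pair t _ ih =>
      intro fuel acc hf
      obtain ⟨f, rfl⟩ : ∃ f, fuel = f + 1 := ⟨fuel - 1, by simp at hf; omega⟩
      rw [pvGo_succ_cons]
      have hpre : (['\\', '\\'].isPrefixOf ('\\' :: '\\' :: t)) = true := by
        simp [List.isPrefixOf]
      rw [hpre]
      simp only [if_true]
      rw [show List.drop (['\\', '\\'].length) ('\\' :: '\\' :: t) = t from rfl]
      rw [ih f _ (by simp at hf; omega)]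
      simp [pvDecode]

theorem pvReplace1_spec (q : Char) (hq : q ≠ '\\') (inner : List Char) (h : PvValid q inner) :
    PySem.Chars.replace inner ['\\', q] [q] = pvD1 q inner := by
  rw [PySem.Chars.replace]
  simp only [List.isEmpty_cons, Bool.false_eq_true, if_false]
  rw [pvGo1_spec q hq inner h inner.length [] le_rfl]
  simp

theorem pvReplace2_spec (l : List Char) (h : PvValid2 l) :
    PySem.Chars.replace l ['\\', '\\'] ['\\'] = pvDecode l := by
  rw [PySem.Chars.replace]
  simp only [List.isEmpty_cons, Bool.false_eq_true, if_false]
  rw [pvGo2_spec l h l.length [] le_rfl]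
  simp

-- ===== VERDICT (by name: the statement is the Claim_ definition above) =====
theorem parse_snbt_string_start_spec : Claim_equal_parse_snbt_string_start := by
  unfold Claim_equal_parse_snbt_string_start
  intro value _ hpre
  unfold Spec_parse_snbt_string_start parse_snbt_string_start parse_snbt_string_start_alt
  cases hv : value.toList with
  | nil => rfl
  | cons c0 rest =>
    rw [pvParseACore, pvParseBCore]
    by_cases hq : c0 ≠ '\'' ∧ c0 ≠ '"'
    · rw [if_pos hq, if_pos hq]
    · rw [if_neg hq, if_neg hq]
      have hq' : c0 = '\'' ∨ c0 = '"' := by tauto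
      have hqc : c0 ≠ '\\' := by rcases hq' with h|h <;> subst h <;> decide
      have hok : pvQuotedOk c0 rest = true := by
        unfold Pre_parse_snbt_string_start at hpre
        rw [hv] at hpre
        rcases hq' with h|h <;> subst h <;> simpa using hpre
      obtain ⟨inner, rest', rfl, hvld⟩ := pvQuotedOk_split c0 rest hok
      rw [pvAQuoted_spec c0 hqc inner hvld rest' 1,
          pvBQuoted_spec c0 hqc inner hvld rest' 1 []]
      show (PySem.Str.replace
          (PySem.Str.replace (String.ofList (PySem.List.slice (c0 :: (inner ++ c0 :: rest'))
              (some 1) (some ((1 + inner.length : Nat) : Int))))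
            (String.ofList ['\\', c0]) (String.ofList [c0]))
          (String.ofList ['\\', '\\']) (String.ofList ['\\']),
          ((1 + inner.length : Nat) : Int) + 1)
        = (String.ofList ([] ++ pvDecode inner), ((1 + inner.length + 1 : Nat) : Int))
      have hslice : PySem.List.slice (c0 :: (inner ++ c0 :: rest')) (some 1)
          (some ((1 + inner.length : Nat) : Int)) = inner := by
        rw [PySem.List.slice_toNat _ (by omega) (by positivity)]
        have h1 : (((1 : Int) + (inner.length : Int)).toNat - 1) = inner.length := by omega
        have h2 : ((1 : Int).toNat) = 1 := rfl
        rw [h2, show ((1 + (inner.length : Nat) : Nat) : Int) = (1 : Int) + (inner.length : Int) by push_cast; ring] at *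
        rw [h1]
        show List.take inner.length (inner ++ c0 :: rest') = inner
        exact List.take_left
      rw [hslice]
      have hA : PySem.Str.replace
          (PySem.Str.replace (String.ofList inner) (String.ofList ['\\', c0]) (String.ofList [c0]))
          (String.ofList ['\\', '\\']) (String.ofList ['\\'])
          = String.ofList (pvDecode inner) := by
        have h1 : PySem.Str.replace (String.ofList inner) (String.ofList ['\\', c0]) (String.ofList [c0])
            = String.ofList (pvD1 c0 inner) := by
          unfold PySem.Str.replace
          rw [String.toList_ofList, String.toList_ofList, String.toList_ofList,
              pvReplace1_spec c0 hqc inner hvld]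
        rw [h1]
        unfold PySem.Str.replace
        rw [String.toList_ofList, String.toList_ofList, String.toList_ofList,
            pvReplace2_spec _ (pvD1_valid2 c0 hqc inner hvld), pvDecode_D1 c0 hqc inner hvld]
      rw [hA]
      refine Prod.ext ?_ ?_
      · simp
      · show ((1 + inner.length : Nat) : Int) + 1 = ((1 + inner.length + 1 : Nat) : Int)
        push_cast
        ring
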